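-- pv_equiv track=rewrite | github.com/DrVinceee/Paper-Holmes | fetch_papers.py | extract_crossref_date
-- ===== SOURCE A (Python) =====
-- from typing import Callable, Dict, Iterable, List, Optional
--
-- def extract_crossref_date(item: Dict) -> str:
--     for key in ("published-print", "published-online", "issued", "created"):
--         date_info = item.get(key)
--         if not date_info:
--             continue
--         date_parts = date_info.get("date-parts")
--         if not date_parts:
--             continue
--         parts = date_parts[0]
--         if not parts:
--             continue
--         year = parts[0]
--         month = parts[1] if len(parts) > 1 else None
--         day = parts[2] if len(parts) > 2 else None
--         if year and month and day:
--             return f"{year:04d}-{month:02d}-{day:02d}"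
--         if year and month:
--             return f"{year:04d}-{month:02d}"
--         if year:
--             return f"{year:04d}"
--     return ""
-- ===== SOURCE B (Python) =====
-- _PRIORITY = {"published-print": 0, "published-online": 1, "issued": 2, "created": 3}
-- _WIDTHS = (4, 2, 2)
--
--
-- def _format(parts):
--     n = 0
--     while n < min(len(parts), 3) and parts[n]:
--         n += 1
--     return "-".join(str(parts[i]).zfill(_WIDTHS[i]) for i in range(n))
--
--
-- def extract_crossref_date(item):
--     table = {}
--     for key, date_info in item.items():
--         rank = _PRIORITY.get(key)
--         if rank is not None:
--             dps = date_info.get("date-parts") if date_info else None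
--             table.setdefault(rank, _format(dps[0] if dps else []))
--     for rank in range(4):
--         if table.get(rank):
--             return table[rank]
--     return ""
-- ===== Notes on version B (the rewrite author's own statement) =====
-- stated objective: alternative
-- what changed: Instead of four priority-ordered dict lookups each followed by a cascade of three format branches, B makes one pass over the item's entries, indexing each recognised key's formatted date under its priority rank (setdefault), then picks the first truthy entry over ranks 0..3; the format cascade becomes count-the-truthy-prefix then join zero-padded segments.
import Mathlib
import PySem

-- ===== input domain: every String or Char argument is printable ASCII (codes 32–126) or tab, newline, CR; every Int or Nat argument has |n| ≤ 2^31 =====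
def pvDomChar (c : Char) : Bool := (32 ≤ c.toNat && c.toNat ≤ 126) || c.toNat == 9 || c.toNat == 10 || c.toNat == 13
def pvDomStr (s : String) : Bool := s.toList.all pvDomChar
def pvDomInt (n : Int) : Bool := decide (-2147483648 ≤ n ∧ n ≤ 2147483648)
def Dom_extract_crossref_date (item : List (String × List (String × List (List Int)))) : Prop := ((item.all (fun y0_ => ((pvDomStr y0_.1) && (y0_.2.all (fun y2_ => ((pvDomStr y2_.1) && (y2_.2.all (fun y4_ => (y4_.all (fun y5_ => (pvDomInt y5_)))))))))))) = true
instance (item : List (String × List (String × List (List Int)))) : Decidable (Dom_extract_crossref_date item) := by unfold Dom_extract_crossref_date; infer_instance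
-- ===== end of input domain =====

-- B replaces A's four priority-ordered dict lookups (each with a cascade of format
-- branches) by a single pass over the item's entries that indexes each recognised key's
-- formatted date under its priority rank, followed by a pick over ranks 0..3; the
-- cascade itself becomes count-the-truthy-prefix then join.

-- f"{n:0wd}" / str(n).zfill(w): for ints both are exactly zfill of str(n)
def pvFmt (n : Int) (w : Int) : String := PySem.Str.zfill (PySem.Int.toStr n) w

-- ===== PORT A =====
-- Python truthiness of `month` / `day` (None or 0 is falsy)
def pvTruthy (o : Option Int) : Bool := match o with | some v => v != 0 | none => false

-- the body of A's loop for one key: `none` = continue, `some s` = return s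
def pvStepA (item : List (String × List (String × List (List Int)))) (key : String) : Option String :=
  match PySem.Dict.get? (PySem.Dict.mk item) key with
  | none => none                                   -- item.get(key) is None: `not date_info`
  | some date_info =>
    if date_info = [] then none else               -- `if not date_info: continue` (empty dict)
    match PySem.Dict.get? (PySem.Dict.mk date_info) "date-parts" with
    | none => none                                 -- `if not date_parts: continue`
    | some date_parts =>
      match date_parts with
      | [] => none                                 -- `if not date_parts: continue`
      | parts :: _ =>                              -- parts = date_parts[0]
        match parts with
        | [] => none                               -- `if not parts: continue`
        | year :: rest =>                          -- year = parts[0]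
          let month : Option Int := rest[0]?       -- parts[1] if len(parts) > 1 else None
          let day : Option Int := rest[1]?         -- parts[2] if len(parts) > 2 else None
          if year != 0 && pvTruthy month && pvTruthy day then
            some (pvFmt year 4 ++ "-" ++ pvFmt (month.getD 0) 2 ++ "-" ++ pvFmt (day.getD 0) 2)
          else if year != 0 && pvTruthy month then
            some (pvFmt year 4 ++ "-" ++ pvFmt (month.getD 0) 2)
          else if year != 0 then
            some (pvFmt year 4)
          else none

def pvLoopA (item : List (String × List (String × List (List Int)))) : List String → String
  | [] => ""
  | key :: keys =>
    match pvStepA item key with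
    | some s => s
    | none => pvLoopA item keys

def extract_crossref_date (item : List (String × List (String × List (List Int)))) : String :=
  pvLoopA item ["published-print", "published-online", "issued", "created"]

-- ===== PORT B =====
-- _PRIORITY of Source B
def pvPriority : PySem.Dict String Int :=
  PySem.Dict.mk [("published-print", 0), ("published-online", 1), ("issued", 2), ("created", 3)]

-- _WIDTHS of Source B
def pvWidths : List Int := [4, 2, 2]

-- the while loop of _format: length of the truthy prefix of parts[:3]
-- (structural recursion over take 3 in place of the index-bounded while; same count)
def pvCountTruthy : List Int → Nat
  | [] => 0
  | v :: rest => if v = 0 then 0 else pvCountTruthy rest + 1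

-- _format of Source B; parts[i] with i < n ≤ len(parts) is in range, so getD is exact
def pvFormatB (parts : List Int) : String :=
  let n := pvCountTruthy (parts.take 3)
  PySem.Str.join "-" ((List.range n).map (fun i =>
    PySem.Str.zfill (PySem.Int.toStr (parts.getD i 0)) (pvWidths.getD i 0)))

-- `dps = date_info.get("date-parts") if date_info else None; dps[0] if dps else []`
def pvPartsOf (di : List (String × List (List Int))) : List Int :=
  let dps : Option (List (List Int)) :=
    if di = [] then none else PySem.Dict.get? (PySem.Dict.mk di) "date-parts"
  match dps with
  | some (p :: _) => p
  | _ => []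

-- the table-building loop body of Source B (`table.setdefault(rank, _format(parts))`)
def pvTableStep (tbl : PySem.Dict Int String)
    (kv : String × List (String × List (List Int))) : PySem.Dict Int String :=
  match PySem.Dict.get? pvPriority kv.1 with
  | none => tbl
  | some rank => PySem.Dict.setdefault tbl rank (pvFormatB (pvPartsOf kv.2))

-- `for rank in range(4): if table.get(rank): return table[rank]` … `return ""`
def pvPickLoop (tbl : PySem.Dict Int String) : List Int → String
  | [] => ""
  | r :: rs =>
    match PySem.Dict.get? tbl r with
    | some s => if s = "" then pvPickLoop tbl rs else s
    | none => pvPickLoop tbl rs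

def extract_crossref_date_alt (item : List (String × List (String × List (List Int)))) : String :=
  let table := item.foldl pvTableStep (PySem.Dict.mk [])
  pvPickLoop table (PySem.List.pyRange 0 4)

-- ===== PRECONDITION & SPEC =====
def Spec_extract_crossref_date (item : List (String × List (String × List (List Int)))) (out : String) : Prop := out = extract_crossref_date_alt item
instance (item : List (String × List (String × List (List Int)))) (out : String) : Decidable (Spec_extract_crossref_date item out) := by unfold Spec_extract_crossref_date; infer_instance

-- ===== CLAIM (what is proved, stated in full; the proofs are below) =====
def Claim_equal_extract_crossref_date : Prop := ∀ (item : List (String × List (String × List (List Int)))), Dom_extract_crossref_date item → Spec_extract_crossref_date item (extract_crossref_date item)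

-- ===== LEMMAS AND PROOFS =====

-- B's candidate value for one key (a proof-side abbreviation)
def pvCand (item : List (String × List (String × List (List Int)))) (key : String) : Option String :=
  (PySem.Dict.get? (PySem.Dict.mk item) key).map (fun di => pvFormatB (pvPartsOf di))

theorem pvFmt_ne_empty (n : Int) (w : Int) (hw : 0 < w) : pvFmt n w ≠ "" := by
  intro h
  have h2 : (pvFmt n w).toList = [] := by simp [h]
  rw [pvFmt, PySem.Str.toList_zfill] at h2
  have := PySem.Chars.length_zfill (PySem.Int.toStr n).toList w
  rw [h2] at this
  simp at this
  omega

theorem pv_join1 (a : String) : PySem.Str.join "-" [a] = a := by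
  rw [← String.toList_inj]; simp [PySem.Chars.join_singleton]

theorem pv_join2 (a b : String) : PySem.Str.join "-" [a, b] = a ++ "-" ++ b := by
  rw [← String.toList_inj]; simp [PySem.Chars.join_cons_cons, PySem.Chars.join_singleton]

theorem pv_join3 (a b c : String) : PySem.Str.join "-" [a, b, c] = a ++ "-" ++ b ++ "-" ++ c := by
  rw [← String.toList_inj]; simp [PySem.Chars.join_cons_cons, PySem.Chars.join_singleton]

theorem pv_app_ne (a b : String) (h : a ≠ "") : a ++ b ≠ "" := by
  rw [Ne, ← String.toList_inj] at *; simp_all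

-- A's if-cascade on one parts list agrees with B's truthy-prefix count-and-join
theorem parts_core (year : Int) (rest : List Int) :
    (if year != 0 && pvTruthy rest[0]? && pvTruthy rest[1]? then
        some (pvFmt year 4 ++ "-" ++ pvFmt (rest[0]?.getD 0) 2 ++ "-" ++ pvFmt (rest[1]?.getD 0) 2)
      else if year != 0 && pvTruthy rest[0]? then
        some (pvFmt year 4 ++ "-" ++ pvFmt (rest[0]?.getD 0) 2)
      else if year != 0 then some (pvFmt year 4) else none)
    = if pvFormatB (year :: rest) = "" then none else some (pvFormatB (year :: rest)) := by
  by_cases hy : year = 0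
  · subst hy; simp [pvFormatB, pvCountTruthy]; rfl
  · have h4 : pvFmt year 4 ≠ "" := pvFmt_ne_empty year 4 (by norm_num)
    match rest with
    | [] =>
      have e : pvFormatB [year] = pvFmt year 4 := by
        simp [pvFormatB, pvCountTruthy, pvWidths, hy, List.range_succ, pvFmt, pv_join1]
      rw [e]
      simp [pvTruthy, hy, h4]
    | [m] =>
      by_cases hm : m = 0
      · subst hm
        have e : pvFormatB [year, 0] = pvFmt year 4 := by
          simp [pvFormatB, pvCountTruthy, pvWidths, hy, List.range_succ, pvFmt, pv_join1]
        rw [e]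
        simp [pvTruthy, hy, h4]
      · have e : pvFormatB [year, m] = pvFmt year 4 ++ "-" ++ pvFmt m 2 := by
          simp [pvFormatB, pvCountTruthy, pvWidths, hy, hm, List.range_succ, pvFmt, pv_join2]
        rw [e]
        simp [pvTruthy, hy, hm, pv_app_ne _ _ (pv_app_ne _ _ h4)]
    | m :: d :: t =>
      by_cases hm : m = 0
      · subst hm
        have e : pvFormatB (year :: 0 :: d :: t) = pvFmt year 4 := by
          simp [pvFormatB, pvCountTruthy, pvWidths, hy, List.range_succ, pvFmt, pv_join1]
        rw [e]
        simp [pvTruthy, hy, h4]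
      · by_cases hd : d = 0
        · subst hd
          have e : pvFormatB (year :: m :: 0 :: t) = pvFmt year 4 ++ "-" ++ pvFmt m 2 := by
            simp [pvFormatB, pvCountTruthy, pvWidths, hy, hm, List.range_succ, pvFmt, pv_join2]
          rw [e]
          simp [pvTruthy, hy, hm, pv_app_ne _ _ (pv_app_ne _ _ h4)]
        · have e : pvFormatB (year :: m :: d :: t) = pvFmt year 4 ++ "-" ++ pvFmt m 2 ++ "-" ++ pvFmt d 2 := by
            simp [pvFormatB, pvCountTruthy, pvWidths, hy, hm, hd, List.range_succ, pvFmt, pv_join3]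
          rw [e]
          simp [pvTruthy, hy, hm, hd, pv_app_ne _ _ (pv_app_ne _ _ (pv_app_ne _ _ (pv_app_ne _ _ h4)))]

-- one iteration of A's loop in terms of B's candidate for the same key
theorem stepA_eq (item : List (String × List (String × List (List Int)))) (key : String) :
    pvStepA item key =
      match pvCand item key with
      | none => none
      | some s => if s = "" then none else some s := by
  unfold pvStepA pvCand
  cases hg : PySem.Dict.get? (PySem.Dict.mk item) key with
  | none => rfl
  | some di =>
    by_cases hdi : di = []
    · subst hdi; simp [pvPartsOf, pvFormatB, pvCountTruthy]; rfl
    · simp only [Option.map_some, if_neg hdi]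
      cases hdp : PySem.Dict.get? (PySem.Dict.mk di) "date-parts" with
      | none => simp [pvPartsOf, hdi, hdp, pvFormatB, pvCountTruthy]; rfl
      | some dps =>
        cases dps with
        | nil => simp [pvPartsOf, hdi, hdp, pvFormatB, pvCountTruthy]; rfl
        | cons parts rest0 =>
          cases parts with
          | nil => simp [pvPartsOf, hdi, hdp, pvFormatB, pvCountTruthy]; rfl
          | cons year rest =>
            have hparts : pvPartsOf di = year :: rest := by simp [pvPartsOf, hdi, hdp]
            rw [hparts]
            simpa using parts_core year rest

-- get? after setdefault: the first value stored at a rank wins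
theorem pv_get?_setdefault (d : PySem.Dict Int String) (k k' : Int) (v : String) :
    PySem.Dict.get? (PySem.Dict.setdefault d k v) k' =
      if k' = k then some ((PySem.Dict.get? d k).getD v) else PySem.Dict.get? d k' := by
  by_cases hc : d.contains k
  · simp only [PySem.Dict.setdefault, hc, if_true]
    by_cases hk : k' = k
    · subst hk
      rw [PySem.Dict.contains_eq_isSome_get?] at hc
      cases hg : PySem.Dict.get? d k' with
      | none => rw [hg] at hc; simp at hc
      | some s => simp [hg]
    · simp [hk]
  · have hfind : d.items.find? (fun p => p.1 == k) = none := by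
      rw [List.find?_eq_none]
      intro p hp hb
      exact hc (List.any_eq_true.mpr ⟨p, hp, hb⟩)
    simp only [PySem.Dict.setdefault, hc, if_false, PySem.Dict.get?, List.find?_append]
    cases hg : d.items.find? (fun p => p.1 == k') with
    | some p =>
      have hk : k' ≠ k := by
        intro he; subst he; rw [hfind] at hg; cases hg
      simp [hg, hk]
    | none =>
      by_cases hk : k' = k
      · subst hk
        have hgd : PySem.Dict.get? d k' = none := by simp [PySem.Dict.get?, hg]
        simp [hg, hgd, List.find?]
      · have hbk : (k == k') = false := by simp [Ne.symm hk]
        simp [hg, List.find?, hbk, PySem.Dict.get?, hk]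

-- the four (key, rank) pairs of _PRIORITY
def pvFourPairs : List (String × Int) :=
  [("published-print", 0), ("published-online", 1), ("issued", 2), ("created", 3)]

theorem priority_of_pair {k : String} {r : Int} (h : (k, r) ∈ pvFourPairs) :
    PySem.Dict.get? pvPriority k = some r := by
  simp only [pvFourPairs, List.mem_cons, List.not_mem_nil, or_false] at h
  rcases h with h | h | h | h <;> (rw [Prod.mk.injEq] at h; rcases h with ⟨h1, h2⟩; subst h1; subst h2; rfl)

theorem priority_spec {k : String} {r : Int} (h : PySem.Dict.get? pvPriority k = some r) :
    (k, r) ∈ pvFourPairs := by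
  simp only [pvPriority, PySem.Dict.get?, List.find?] at h
  cases hb1 : (("published-print" : String) == k) <;> rw [hb1] at h
  case true => simp_all [pvFourPairs]
  all_goals cases hb2 : (("published-online" : String) == k) <;> rw [hb2] at h
  case true => simp_all [pvFourPairs]
  all_goals cases hb3 : (("issued" : String) == k) <;> rw [hb3] at h
  case true => simp_all [pvFourPairs]
  all_goals cases hb4 : (("created" : String) == k) <;> rw [hb4] at h
  case true => simp_all [pvFourPairs]
  simp at h

theorem priority_inj {k k' : String} {r : Int}
    (h : PySem.Dict.get? pvPriority k = some r) (h' : PySem.Dict.get? pvPriority k' = some r) :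
    k = k' := by
  have m1 := priority_spec h
  have m2 := priority_spec h'
  simp only [pvFourPairs, List.mem_cons, List.not_mem_nil, or_false, Prod.mk.injEq] at m1 m2
  rcases m1 with ⟨e1, e2⟩ | ⟨e1, e2⟩ | ⟨e1, e2⟩ | ⟨e1, e2⟩ <;>
    rcases m2 with ⟨f1, f2⟩ | ⟨f1, f2⟩ | ⟨f1, f2⟩ | ⟨f1, f2⟩ <;> simp_all

-- the table built by B's single pass looks up to B's candidate for the rank's key
theorem table_get {k : String} {r : Int} (hk : (k, r) ∈ pvFourPairs)
    (item : List (String × List (String × List (List Int)))) (tbl : PySem.Dict Int String) :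
    PySem.Dict.get? (item.foldl pvTableStep tbl) r =
      match PySem.Dict.get? tbl r with
      | some s => some s
      | none => pvCand item k := by
  induction item generalizing tbl with
  | nil => cases hg : PySem.Dict.get? tbl r <;> rw [List.foldl_nil, hg] <;> rfl
  | cons kv rest ih =>
    obtain ⟨k', di⟩ := kv
    have hcand : pvCand ((k', di) :: rest) k =
        if k' = k then some (pvFormatB (pvPartsOf di)) else pvCand rest k := by
      simp only [pvCand, PySem.Dict.get?_mk_cons]
      by_cases he : k' = k <;> simp [he]
    rw [List.foldl_cons]
    cases hp : PySem.Dict.get? pvPriority k' with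
    | none =>
      have hne : k' ≠ k := by
        intro he; subst he; rw [priority_of_pair hk] at hp; cases hp
      rw [show pvTableStep tbl (k', di) = tbl by simp [pvTableStep, hp]]
      rw [ih tbl, hcand, if_neg hne]
    | some r' =>
      rw [show pvTableStep tbl (k', di) =
            PySem.Dict.setdefault tbl r' (pvFormatB (pvPartsOf di)) by simp [pvTableStep, hp]]
      rw [ih, pv_get?_setdefault]
      by_cases hrr : r = r'
      · subst hrr
        have hkk : k = k' := priority_inj (priority_of_pair hk) hp
        rw [if_pos rfl, hcand, if_pos hkk.symm]
        cases hg : PySem.Dict.get? tbl r <;> simp [hg]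
      · have hne : k' ≠ k := by
          intro he; subst he; rw [priority_of_pair hk] at hp
          exact hrr (Option.some.injEq _ _ ▸ hp)
        rw [if_neg hrr, hcand, if_neg hne]

-- one key of A's loop against one rank of B's pick loop
theorem pick_step (item : List (String × List (String × List (List Int))))
    {k : String} {r : Int} (hk : (k, r) ∈ pvFourPairs) (ks : List String) (rs : List Int)
    (ih : pvLoopA item ks = pvPickLoop (item.foldl pvTableStep (PySem.Dict.mk [])) rs) :
    pvLoopA item (k :: ks) = pvPickLoop (item.foldl pvTableStep (PySem.Dict.mk [])) (r :: rs) := by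
  have hempty : PySem.Dict.get? (PySem.Dict.mk ([] : List (Int × String))) r = none := rfl
  have ht := table_get hk item (PySem.Dict.mk [])
  rw [hempty] at ht
  simp only [pvLoopA, pvPickLoop, stepA_eq, ht]
  cases hc : pvCand item k with
  | none => simpa using ih
  | some s =>
    by_cases hs : s = "" <;> simp [hs, ih]

-- ===== VERDICT (by name: the statement is the Claim_ definition above) =====
theorem extract_crossref_date_spec : Claim_equal_extract_crossref_date := by
  intro item _
  unfold Spec_extract_crossref_date extract_crossref_date extract_crossref_date_alt
  have hrange : PySem.List.pyRange 0 4 = [0, 1, 2, 3] := by decide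
  rw [hrange]
  refine pick_step item (by decide) _ _ ?_
  refine pick_step item (by decide) _ _ ?_
  refine pick_step item (by decide) _ _ ?_
  refine pick_step item (by decide) _ _ ?_
  rfl
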